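-- pv_equiv track=rewrite | github.com/P4X-ng/metasploit-framework-pynative | tools/password/vxencrypt.py | hashit
-- ===== SOURCE A (Python) =====
-- def hashit(inp):
--     """Calculate VxWorks password hash"""
--     if len(inp) < 8 or len(inp) > 120:
--         raise ValueError("The password must be between 8 and 120 characters")
--
--     total = 0
--     bytes_arr = [ord(c) for c in inp]
--
--     for i, byte in enumerate(bytes_arr):
--         total += (byte * (i + 1)) ^ (i + 1)
--
--     return hackit(total)
--
-- def hackit(total):
--     """Apply VxWorks hash algorithm"""
--     magic = 31695317
--     res = str((total * magic) & 0xffffffff)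
--
--     result = []
--     for c in res:
--         byte = ord(c)
--         if byte < 0x33:
--             byte += 0x21
--         if byte < 0x37:
--             byte += 0x2f
--         if byte < 0x39:
--             byte += 0x42
--         result.append(chr(byte))
--
--     return ''.join(result)
-- ===== SOURCE B (Python) =====
-- # Same hash, different decomposition: the weighted-XOR total is accumulated
-- # walking the password BACKWARDS with an explicitly decremented weight, and the
-- # digit string is never built: the 32-bit product's decimal digits are extracted
-- # arithmetically (divmod) and emitted directly as their transformed characters,
-- # assembling the result back-to-front.
-- _OUT = "QRSbcdeyz9"
--
-- def hashit(inp):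
--     """Calculate VxWorks password hash"""
--     if len(inp) < 8 or len(inp) > 120:
--         raise ValueError("The password must be between 8 and 120 characters")
--     total = 0
--     i = len(inp)
--     for c in reversed(inp):
--         total += (ord(c) * i) ^ i
--         i -= 1
--     v = (total * 31695317) % 4294967296
--     if v == 0:
--         return _OUT[0]
--     out = []
--     while v:
--         v, d = divmod(v, 10)
--         out.append(_OUT[d])
--     return ''.join(reversed(out))
-- ===== Notes on version B (the rewrite author's own statement) =====
-- stated objective: alternative
-- what changed: B accumulates the weighted-XOR total by walking the password backwards with an explicitly decremented weight, and replaces str()-then-per-character-branch-cascade by arithmetic digit extraction: divmod by 10 pulls decimal digits of the 32-bit product and emits each directly as its transformed character, building the output back-to-front.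
import Mathlib
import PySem

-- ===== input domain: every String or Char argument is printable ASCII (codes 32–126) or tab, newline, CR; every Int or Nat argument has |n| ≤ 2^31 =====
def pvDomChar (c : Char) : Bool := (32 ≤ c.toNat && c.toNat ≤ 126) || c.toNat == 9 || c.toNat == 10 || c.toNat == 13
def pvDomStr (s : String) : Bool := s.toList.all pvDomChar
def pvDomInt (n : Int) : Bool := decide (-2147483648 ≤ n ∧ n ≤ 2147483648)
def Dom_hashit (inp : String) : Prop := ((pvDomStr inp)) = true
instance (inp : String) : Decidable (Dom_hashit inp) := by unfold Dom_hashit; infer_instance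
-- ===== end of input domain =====

-- B walks the password backwards with a decremented weight and extracts the
-- decimal digits of the 32-bit product arithmetically (divmod), emitting each
-- directly as its transformed character, back-to-front (objective: alternative).

-- ===== PORT A =====
-- loop body of hackit: the three-conditional cascade on one character.
-- chr(byte): byte here is always < 0xd800, so Char.ofNat byte.toNat is exact.
def hashitCascade (c : Char) : Char :=
  let byte : Int := c.toNat
  let byte := if byte < 0x33 then byte + 0x21 else byte
  let byte := if byte < 0x37 then byte + 0x2f else byte
  let byte := if byte < 0x39 then byte + 0x42 else byte
  Char.ofNat byte.toNat

def hashitHackit (total : Int) : String :=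
  let magic : Int := 31695317
  let res := PySem.Int.toStr (PySem.Int.band (total * magic) 0xffffffff)
  String.mk (res.toList.foldl (fun acc c => acc ++ [hashitCascade c]) [])

def hashit (inp : String) : String :=
  let bytes : List Int := inp.toList.map (fun c => (c.toNat : Int))
  let total : Int := (PySem.List.enumerate bytes).foldl
    (fun t p => t + PySem.Int.bxor (p.2 * (p.1 + 1)) (p.1 + 1)) 0
  hashitHackit total

-- ===== PORT B =====
-- _OUT = "QRSbcdeyz9"
def hashitOut : List Char := ['Q','R','S','b','c','d','e','y','z','9']

-- the 'while v:' digit loop; out is appended least-significant digit first,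
-- so this list is the REVERSE of the final string (joined reversed in B).
def hashitDigitsRev : Nat → List Char
  | 0 => []
  | (n+1) => hashitOut.getD ((n+1) % 10) '?' :: hashitDigitsRev ((n+1)/10)
decreasing_by exact Nat.div_lt_self (Nat.succ_pos n) (by norm_num)

def hashit_alt (inp : String) : String :=
  let cs := inp.toList
  let st := cs.reverse.foldl
    (fun (s : Int × Int) c => (s.1 + PySem.Int.bxor ((c.toNat : Int) * s.2) s.2, s.2 - 1))
    (0, (cs.length : Int))
  -- total is a sum of XORs of nonnegatives, so & 0xffffffff ≡ % 2^32 (Python-exact here)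
  let v : Int := PySem.Int.mod (st.1 * 31695317) 4294967296
  if v == 0 then "Q" else String.mk ((hashitDigitsRev v.toNat).reverse)

-- ===== PRECONDITION & SPEC =====
-- A raises ValueError when len(inp) < 8 or len(inp) > 120 (B raises there too)
def Pre_hashit (inp : String) : Prop := 8 ≤ PySem.Str.len inp ∧ PySem.Str.len inp ≤ 120
instance (inp : String) : Decidable (Pre_hashit inp) := by unfold Pre_hashit; infer_instance
def pvWitness_hashit : String := "password1"
def Spec_hashit (inp : String) (out : String) : Prop := out = hashit_alt inp
instance (inp : String) (out : String) : Decidable (Spec_hashit inp out) := by unfold Spec_hashit; infer_instance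

-- ===== CLAIM (what is proved, stated in full; the proofs are below) =====
def Claim_equal_hashit : Prop := ∀ (inp : String), Dom_hashit inp → Pre_hashit inp → Spec_hashit inp (hashit inp)

-- ===== LEMMAS AND PROOFS =====

-- forward weighted XOR sum with running weight i
def pvWsum : List Char → Int → Int
  | [], _ => 0
  | c :: cs, i => PySem.Int.bxor ((c.toNat : Int) * i) i + pvWsum cs (i + 1)

theorem pv_wsum_nonneg (xs : List Char) (i : Int) (hi : 0 ≤ i) : 0 ≤ pvWsum xs i := by
  induction xs generalizing i with
  | nil => simp [pvWsum]
  | cons c cs ih =>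
    have h1 : 0 ≤ PySem.Int.bxor ((c.toNat : Int) * i) i := by
      rw [PySem.Int.bxor_of_nonneg (by positivity) hi]; positivity
    have := ih (i + 1) (by omega)
    simp only [pvWsum]; omega

-- A's enumerate-foldl computes pvWsum with weights starting at s+1
theorem pv_enum_foldl_eq_wsum (xs : List Char) (s t : Int) :
    (PySem.List.enumerate (xs.map (fun c => (c.toNat : Int))) s).foldl
      (fun t p => t + PySem.Int.bxor (p.2 * (p.1 + 1)) (p.1 + 1)) t
      = t + pvWsum xs (s + 1) := by
  induction xs generalizing s t with
  | nil => simp [PySem.List.enumerate_nil, pvWsum]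
  | cons c cs ih =>
    simp only [List.map_cons, PySem.List.enumerate_cons, List.foldl_cons, pvWsum]
    rw [ih]
    ring_nf

-- B's backwards fold with a decremented weight computes the same sum
theorem pv_rev_foldl_eq_wsum (xs : List Char) (t k : Int) :
    xs.reverse.foldl
      (fun (s : Int × Int) c => (s.1 + PySem.Int.bxor ((c.toNat : Int) * s.2) s.2, s.2 - 1))
      (t, k)
      = (t + pvWsum xs (k - xs.length + 1), k - xs.length) := by
  induction xs generalizing t k with
  | nil => simp [pvWsum]
  | cons c cs ih =>
    simp only [List.reverse_cons, List.foldl_append, List.foldl_cons, List.foldl_nil, ih,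
      List.length_cons, pvWsum, Prod.mk.injEq]
    push_cast
    have h1 : k - ((cs.length : Int) + 1) + 1 = k - cs.length := by ring
    rw [h1]
    exact ⟨by ring, by ring⟩

-- toDigitsCore with enough fuel builds exactly the reversed divmod digit list
def pvDigitsRev : Nat → List Char
  | 0 => []
  | (n+1) => Nat.digitChar ((n+1) % 10) :: pvDigitsRev ((n+1)/10)
decreasing_by exact Nat.div_lt_self (Nat.succ_pos n) (by norm_num)

theorem pv_toDigitsCore_eq (f : Nat) : ∀ (n : Nat) (acc : List Char), n < f →
    Nat.toDigitsCore 10 f n acc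
      = (if n = 0 then ['0'] else (pvDigitsRev n).reverse) ++ acc := by
  induction f with
  | zero => intro n acc h; omega
  | succ f ih =>
    intro n acc h
    rw [Nat.toDigitsCore]
    by_cases h0 : n / 10 = 0
    · have hn : n < 10 := by omega
      rw [if_pos h0]
      rcases Nat.eq_zero_or_pos n with h1 | h1
      · subst h1; simp; decide
      · have : n ≠ 0 := by omega
        rw [if_neg this]
        cases n with
        | zero => omega
        | succ m =>
          rw [pvDigitsRev, h0, pvDigitsRev]
          simp [Nat.mod_eq_of_lt hn]
    · rw [if_neg h0]
      have hn10 : 10 ≤ n := by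
        by_contra hc
        exact h0 (Nat.div_eq_of_lt (by omega))
      have hlt : n / 10 < f := by
        have := Nat.div_lt_self (show 0 < n by omega) (show (1:Nat) < 10 by norm_num)
        omega
      rw [ih (n / 10) _ hlt, if_neg h0]
      cases n with
      | zero => omega
      | succ m => rw [pvDigitsRev]; simp

-- the cascade sends digit d's character to _OUT[d]
theorem pv_cascade_out (d : Nat) (hd : d < 10) :
    hashitCascade (Nat.digitChar d) = hashitOut.getD d '?' := by
  interval_cases d <;> decide

-- mapping the cascade over the decimal digits = B's direct digit emission
theorem pv_map_cascade_digitsRev (n : Nat) :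
    (pvDigitsRev n).map hashitCascade = hashitDigitsRev n := by
  induction n using Nat.strong_induction_on with
  | _ n ih =>
    cases n with
    | zero => simp [pvDigitsRev, hashitDigitsRev]
    | succ m =>
      rw [pvDigitsRev, hashitDigitsRev, List.map_cons,
        pv_cascade_out _ (Nat.mod_lt _ (by norm_num)),
        ih _ (Nat.div_lt_self (Nat.succ_pos m) (by norm_num))]

-- back-appending foldl = map
theorem pv_foldl_append_eq_map {α β : Type} (g : α → β) (l : List α) (acc : List β) :
    l.foldl (fun acc c => acc ++ [g c]) acc = acc ++ l.map g := by
  induction l generalizing acc with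
  | nil => simp
  | cons x xs ih => simp [List.foldl_cons, ih]

-- Python & 0xffffffff = % 2^32 on nonnegative ints
theorem pv_band_eq_mod (x : Int) (hx : 0 ≤ x) :
    PySem.Int.band x 0xffffffff = PySem.Int.mod x 4294967296 := by
  rw [PySem.Int.band_of_nonneg hx (by norm_num),
    PySem.Int.mod_eq_emod_of_pos (show (0:Int) < 4294967296 by norm_num)]
  have h1 : (Int.toNat 4294967295) = 2 ^ 32 - 1 := by decide
  have h2 : x.toNat &&& (2 ^ 32 - 1) = x.toNat % 2 ^ 32 :=
    Nat.and_two_pow_sub_one_eq_mod x.toNat 32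
  rw [h1, h2]
  have h3 : (2 : Nat) ^ 32 = 4294967296 := by norm_num
  rw [h3]
  omega

-- ===== VERDICT (by name: the statement is the Claim_ definition above) =====
theorem hashit_spec : Claim_equal_hashit := by
  intro inp _ _
  unfold Spec_hashit hashit hashit_alt hashitHackit
  simp only []
  rw [pv_enum_foldl_eq_wsum inp.toList 0 0, pv_rev_foldl_eq_wsum inp.toList 0 (inp.toList.length)]
  simp only [zero_add, sub_self]
  set t : Int := pvWsum inp.toList 1 with ht
  have htn : 0 ≤ t := pv_wsum_nonneg _ _ (by norm_num)
  have hxn : 0 ≤ t * 31695317 := by positivity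
  rw [pv_band_eq_mod _ hxn]
  set v : Int := PySem.Int.mod (t * 31695317) 4294967296 with hv
  have hvn : 0 ≤ v := PySem.Int.mod_nonneg _ (by norm_num)
  have htoChars : (PySem.Int.toStr v).toList = Nat.toDigits 10 v.toNat := by
    rw [PySem.Int.toList_toStr]
    unfold PySem.Int.toChars
    rw [if_neg (by omega)]
  rw [pv_foldl_append_eq_map, List.nil_append, htoChars]
  unfold Nat.toDigits
  rw [pv_toDigitsCore_eq _ _ _ (Nat.lt_succ_self _)]
  by_cases h0 : v = 0
  · have hb : (v == 0) = true := by simp [h0]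
    rw [hb, if_pos rfl, h0]
    decide
  · have hne : v.toNat ≠ 0 := by omega
    have hb : (v == 0) = false := by simp [h0]
    rw [hb, if_neg hne]
    simp only [List.append_nil]
    rw [List.map_reverse, pv_map_cascade_digitsRev]
    simp
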